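-- pv_equiv track=rewrite | github.com/vigneshsarma/pipes | util.py | convert2locdict
-- ===== SOURCE A (Python) =====
-- def convert2locdict(game_board, raise_error=True):
--         locdict = {}
--         for k, v in game_board.items():
--             for new_k in v:
--                 if new_k in locdict:
--                     if raise_error:
--                         raise KeyError('Overlapping paths')
--                     return None
--                 locdict[new_k] = k
--         return locdict
-- ===== SOURCE B (Python) =====
-- def convert2locdict(game_board, raise_error=True):
--     pairs = [(loc, k) for k, v in game_board.items() for loc in v]
--     locs = sorted(loc for loc, _ in pairs)
--     for a, b in zip(locs, locs[1:]):
--         if a == b: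
--             if raise_error:
--                 raise KeyError('Overlapping paths')
--             return None
--     return dict(pairs)
-- ===== Notes on version B (the rewrite author's own statement) =====
-- stated objective: alternative
-- what changed: B stages the work: it first flattens the board into (location, key) pairs, then detects overlaps by sorting the locations and scanning adjacent entries for equality, and only then builds the dict with a single dict(pairs) call, instead of A's incremental build with a per-item membership guard.
import Mathlib
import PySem

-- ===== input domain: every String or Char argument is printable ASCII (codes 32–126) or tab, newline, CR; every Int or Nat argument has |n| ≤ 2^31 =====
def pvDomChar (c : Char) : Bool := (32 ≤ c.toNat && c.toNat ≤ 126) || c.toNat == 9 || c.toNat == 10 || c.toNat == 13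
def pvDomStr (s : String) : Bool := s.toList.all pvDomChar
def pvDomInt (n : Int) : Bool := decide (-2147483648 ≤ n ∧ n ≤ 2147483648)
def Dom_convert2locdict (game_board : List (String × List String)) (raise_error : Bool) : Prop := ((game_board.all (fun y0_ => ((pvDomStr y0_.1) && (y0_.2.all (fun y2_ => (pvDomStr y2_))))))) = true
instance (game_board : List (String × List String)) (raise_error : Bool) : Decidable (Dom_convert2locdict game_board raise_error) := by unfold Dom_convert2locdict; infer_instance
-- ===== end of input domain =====

-- B flattens the board into (location, key) pairs, detects overlaps by sorting the locations and
-- scanning adjacent entries, then builds the dict in one dict(pairs) call (objective: alternative).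


-- ===== PORT A =====
-- inner 'for new_k in v' loop: membership guard, insert on success; none = early exit
def aInner (locdict : PySem.Dict String String) (k : String) : List String → Option (PySem.Dict String String)
  | [] => some locdict
  | nk :: rest =>
    if locdict.contains nk then
      none  -- Python: raise KeyError (raise_error=True, excluded by Pre_) or 'return None'
    else aInner (locdict.insert nk k) k rest

-- outer 'for k, v in game_board.items()' loop
def aOuter (locdict : PySem.Dict String String) : List (String × List String) → Option (PySem.Dict String String)
  | [] => some locdict
  | (k, v) :: rest =>
    match aInner locdict k v with
    | none => none
    | some d => aOuter d rest

def convert2locdict (game_board : List (String × List String)) (raise_error : Bool) : Option (List (String × String)) :=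
  match aOuter PySem.Dict.empty (PySem.Dict.ofList game_board).items with
  | some d => some d.items
  | none => none  -- KeyError (only when raise_error = true; outside Pre_) or Python None

-- ===== PORT B =====
-- the '[(loc, k) for k, v in game_board.items() for loc in v]' comprehension
def bPairs (items : List (String × List String)) : List (String × String) :=
  items.flatMap (fun kv => kv.2.map (fun loc => (loc, kv.1)))

-- the 'for a, b in zip(locs, locs[1:]): if a == b: …' scan
def bAdjEq : List String → Bool
  | a :: b :: rest => a == b || bAdjEq (b :: rest)
  | _ => false

def convert2locdict_alt (game_board : List (String × List String)) (raise_error : Bool) : Option (List (String × String)) :=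
  let pairs := bPairs (PySem.Dict.ofList game_board).items
  let locs := PySem.List.sorted (pairs.map Prod.fst) (fun x => x) false
  if bAdjEq locs then
    none  -- KeyError (only when raise_error = true; outside Pre_) or Python None
  else some (PySem.Dict.ofList pairs).items

-- ===== PRECONDITION & SPEC =====
-- Pre_ excludes exactly the inputs on which the Python A raises KeyError: raise_error=True with an
-- overlapping location (a repeated string across the dict's value lists). (B raises there too.)
def Pre_convert2locdict (game_board : List (String × List String)) (raise_error : Bool) : Prop :=
  raise_error = true → ((PySem.Dict.ofList game_board).items.flatMap Prod.snd).Nodup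
instance (game_board : List (String × List String)) (raise_error : Bool) : Decidable (Pre_convert2locdict game_board raise_error) := by unfold Pre_convert2locdict; infer_instance
def pvWitness_convert2locdict : (List (String × List String)) × Bool := ([("a", ["x", "y"]), ("b", ["z"])], true)

def Spec_convert2locdict (game_board : List (String × List String)) (raise_error : Bool) (out : Option (List (String × String))) : Prop := out = convert2locdict_alt game_board raise_error
instance (game_board : List (String × List String)) (raise_error : Bool) (out : Option (List (String × String))) : Decidable (Spec_convert2locdict game_board raise_error out) := by unfold Spec_convert2locdict; infer_instance

-- ===== CLAIM (what is proved, stated in full; the proofs are below) =====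
def Claim_equal_convert2locdict : Prop := ∀ (game_board : List (String × List String)) (raise_error : Bool), Dom_convert2locdict game_board raise_error → Pre_convert2locdict game_board raise_error → Spec_convert2locdict game_board raise_error (convert2locdict game_board raise_error)

-- ===== LEMMAS AND PROOFS =====

-- keys after A's inner fold: old membership or membership in v
lemma contains_foldl_insert (v : List String) (k : String) (d : PySem.Dict String String) (x : String) :
    (v.foldl (fun d loc => d.insert loc k) d).contains x = (d.contains x || decide (x ∈ v)) := by
  induction v generalizing d with
  | nil => simp
  | cons a rest ih =>
    simp only [List.foldl_cons, ih, PySem.Dict.contains_insert, List.mem_cons]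
    by_cases hxa : x = a
    · simp [hxa]
    · have hb : (x == a) = false := by simp [hxa]
      simp [hb, hxa]

-- A's inner loop succeeds iff v is fresh w.r.t. the dict and duplicate-free, and then it folds inserts
lemma aInner_eq (v : List String) (k : String) (d : PySem.Dict String String) :
    aInner d k v = if (∀ x ∈ v, d.contains x = false) ∧ v.Nodup
      then some (v.foldl (fun d loc => d.insert loc k) d) else none := by
  induction v generalizing d with
  | nil => simp [aInner]
  | cons a rest ih =>
    simp only [aInner, List.foldl_cons, ih]
    by_cases ha : d.contains a = true
    · rw [if_pos ha, if_neg]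
      intro ⟨h1, _⟩
      exact absurd (h1 a List.mem_cons_self) (by simp [ha])
    · have ha' : d.contains a = false := by simpa using ha
      rw [if_neg ha]
      by_cases hc : (∀ x ∈ rest, (d.insert a k).contains x = false) ∧ rest.Nodup
      · have hcond : (∀ x ∈ a :: rest, d.contains x = false) ∧ (a :: rest).Nodup := by
          obtain ⟨h1, h2⟩ := hc
          refine ⟨?_, ?_⟩
          · intro x hx
            rcases List.mem_cons.mp hx with rfl | hx
            · exact ha'
            · have := h1 x hx
              simp only [PySem.Dict.contains_insert] at this
              exact (Bool.or_eq_false_iff.mp this).2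
          · refine List.nodup_cons.mpr ⟨fun hmem => ?_, h2⟩
            have := h1 a hmem
            simp at this
        rw [if_pos hc, if_pos hcond]
      · have hcond : ¬ ((∀ x ∈ a :: rest, d.contains x = false) ∧ (a :: rest).Nodup) := by
          intro ⟨h1, h2⟩
          apply hc
          have h2' := List.nodup_cons.mp h2
          refine ⟨fun x hx => ?_, h2'.2⟩
          simp only [PySem.Dict.contains_insert, Bool.or_eq_false_iff]
          exact ⟨by simpa using fun hxa : x = a => h2'.1 (hxa ▸ hx), h1 x (List.mem_cons_of_mem _ hx)⟩
        rw [if_neg hc, if_neg hcond]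

-- A's outer loop succeeds iff the flattened locations are fresh and duplicate-free, and then it
-- folds the inserts of all (loc, key) pairs
lemma aOuter_eq (items : List (String × List String)) (d : PySem.Dict String String) :
    aOuter d items = if (∀ x ∈ items.flatMap Prod.snd, d.contains x = false) ∧ (items.flatMap Prod.snd).Nodup
      then some ((bPairs items).foldl (fun d p => d.insert p.1 p.2) d) else none := by
  induction items generalizing d with
  | nil => simp [aOuter, bPairs]
  | cons kv rest ih =>
    obtain ⟨k, v⟩ := kv
    simp only [aOuter, aInner_eq]
    have hflat : ((k, v) :: rest).flatMap Prod.snd = v ++ rest.flatMap Prod.snd := by simp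
    have hpairs : bPairs ((k, v) :: rest) = v.map (fun loc => (loc, k)) ++ bPairs rest := by
      simp [bPairs]
    have hfold : (bPairs ((k, v) :: rest)).foldl (fun d p => d.insert p.1 p.2) d
        = (bPairs rest).foldl (fun d p => d.insert p.1 p.2)
            (v.foldl (fun d loc => d.insert loc k) d) := by
      rw [hpairs, List.foldl_append, List.foldl_map]
    by_cases hv : (∀ x ∈ v, d.contains x = false) ∧ v.Nodup
    · rw [if_pos hv]
      show aOuter (v.foldl (fun d loc => d.insert loc k) d) rest = _
      rw [ih]
      have hcont : ∀ x, (v.foldl (fun d loc => d.insert loc k) d).contains x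
          = (d.contains x || decide (x ∈ v)) := contains_foldl_insert v k d
      by_cases hr : (∀ x ∈ rest.flatMap Prod.snd, d.contains x = false ∧ x ∉ v)
          ∧ (rest.flatMap Prod.snd).Nodup
      · have hc1 : (∀ x ∈ rest.flatMap Prod.snd,
            (v.foldl (fun d loc => d.insert loc k) d).contains x = false) ∧ (rest.flatMap Prod.snd).Nodup := by
          refine ⟨fun x hx => ?_, hr.2⟩
          rw [hcont]
          have := hr.1 x hx
          simp [this.1, this.2]
        have hc2 : (∀ x ∈ ((k, v) :: rest).flatMap Prod.snd, d.contains x = false)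
            ∧ (((k, v) :: rest).flatMap Prod.snd).Nodup := by
          rw [hflat]
          refine ⟨fun x hx => ?_, ?_⟩
          · rcases List.mem_append.mp hx with hx | hx
            · exact hv.1 x hx
            · exact (hr.1 x hx).1
          · refine List.nodup_append.mpr ⟨hv.2, hr.2, ?_⟩
            intro a hav b hbr hab
            exact (hr.1 b hbr).2 (hab ▸ hav)
        rw [if_pos hc1, if_pos hc2, hfold]
      · have hc1 : ¬ ((∀ x ∈ rest.flatMap Prod.snd,
            (v.foldl (fun d loc => d.insert loc k) d).contains x = false) ∧ (rest.flatMap Prod.snd).Nodup) := by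
          intro ⟨h1, h2⟩
          apply hr
          refine ⟨fun x hx => ?_, h2⟩
          have := h1 x hx
          rw [hcont] at this
          rcases Bool.or_eq_false_iff.mp this with ⟨hx1, hx2⟩
          exact ⟨hx1, by simpa using hx2⟩
        have hc2 : ¬ ((∀ x ∈ ((k, v) :: rest).flatMap Prod.snd, d.contains x = false)
            ∧ (((k, v) :: rest).flatMap Prod.snd).Nodup) := by
          rw [hflat]
          intro ⟨h1, h2⟩
          apply hr
          rw [List.nodup_append] at h2
          refine ⟨fun x hx => ⟨h1 x (List.mem_append_right _ hx), fun hxv => h2.2.2 x hxv x hx rfl⟩, h2.2.1⟩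
        rw [if_neg hc1, if_neg hc2]
    · have hc2 : ¬ ((∀ x ∈ ((k, v) :: rest).flatMap Prod.snd, d.contains x = false)
          ∧ (((k, v) :: rest).flatMap Prod.snd).Nodup) := by
        rw [hflat]
        intro ⟨h1, h2⟩
        exact hv ⟨fun x hx => h1 x (List.mem_append_left _ hx), (List.nodup_append.mp h2).1⟩
      rw [if_neg hv, if_neg hc2]

-- the flattened locations ARE the first components of B's pair list
lemma map_fst_bPairs (items : List (String × List String)) :
    (bPairs items).map Prod.fst = items.flatMap Prod.snd := by
  simp [bPairs, List.map_flatMap, Function.comp_def]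

-- on a ≤-sorted list, the adjacent-equality scan is the duplicate test
lemma bAdjEq_eq_false_iff (l : List String) (h : l.Pairwise (· ≤ ·)) :
    bAdjEq l = false ↔ l.Nodup := by
  induction l with
  | nil => simp [bAdjEq]
  | cons a t ih =>
    cases t with
    | nil => simp [bAdjEq]
    | cons b r =>
      have h' := List.pairwise_cons.mp h
      have ihr := ih h'.2
      have hab : a ≤ b := h'.1 b List.mem_cons_self
      have hbr := List.pairwise_cons.mp h'.2
      simp only [bAdjEq, Bool.or_eq_false_iff, beq_eq_false_iff_ne, ihr, List.nodup_cons,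
        List.mem_cons, not_or]
      constructor
      · rintro ⟨hne, hnd⟩
        refine ⟨⟨hne, fun har => ?_⟩, hnd⟩
        have := hbr.1 a har
        exact hne (le_antisymm hab this)
      · rintro ⟨⟨hne, _⟩, hnd⟩
        exact ⟨hne, hnd⟩

-- ===== VERDICT (by name: the statement is the Claim_ definition above) =====
theorem convert2locdict_spec : Claim_equal_convert2locdict := by
  intro game_board raise_error _ _
  unfold Spec_convert2locdict convert2locdict convert2locdict_alt
  rw [aOuter_eq]
  have hperm : (PySem.List.sorted ((bPairs (PySem.Dict.ofList game_board).items).map Prod.fst) (fun x => x) false).Perm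
      ((PySem.Dict.ofList game_board).items.flatMap Prod.snd) := by
    rw [← map_fst_bPairs]
    exact PySem.List.sorted_perm _ _ _
  have hsorted : (PySem.List.sorted ((bPairs (PySem.Dict.ofList game_board).items).map Prod.fst) (fun x => x) false).Pairwise (· ≤ ·) := by
    have := PySem.List.sorted_pairwise ((bPairs (PySem.Dict.ofList game_board).items).map Prod.fst) (fun x => x)
    simpa using this
  have hadj := bAdjEq_eq_false_iff _ hsorted
  have hce : ∀ x ∈ (PySem.Dict.ofList game_board).items.flatMap Prod.snd,
      (PySem.Dict.empty : PySem.Dict String String).contains x = false := fun x _ => by simp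
  by_cases hnd : ((PySem.Dict.ofList game_board).items.flatMap Prod.snd).Nodup
  · have hfalse : bAdjEq (PySem.List.sorted ((bPairs (PySem.Dict.ofList game_board).items).map Prod.fst) (fun x => x) false) = false := hadj.mpr (hperm.nodup_iff.mpr hnd)
    rw [if_pos ⟨hce, hnd⟩]
    simp only [hfalse, Bool.false_eq_true, if_false]
    rfl
  · have htrue : bAdjEq (PySem.List.sorted ((bPairs (PySem.Dict.ofList game_board).items).map Prod.fst) (fun x => x) false) = true := by
      rcases Bool.eq_false_or_eq_true (bAdjEq (PySem.List.sorted ((bPairs (PySem.Dict.ofList game_board).items).map Prod.fst) (fun x => x) false)) with ht | hf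
      · exact ht
      · exact absurd (hperm.nodup_iff.mp (hadj.mp hf)) hnd
    rw [if_neg (fun h => hnd h.2)]
    simp only [htrue, if_true]
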